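-- pv_equiv track=rewrite | github.com/piotrjanik/ai-tuner | src/data/prepare_data.py | _collect_doc
-- ===== SOURCE A (Python) =====
-- def _collect_doc(lines, decl_line):
--     comments = []
--     j = decl_line - 1
--     while j >= 0:
--         s = lines[j].strip()
--         if s.startswith("//"):
--             comments.insert(0, s[2:].lstrip() if len(s) > 2 else "")
--             j -= 1
--         elif not s:
--             # allow one blank line gap
--             if j - 1 >= 0 and lines[j - 1].strip().startswith("//"):
--                 j -= 1
--             else:
--                 break
--         else:
--             break
--     return "\n".join(comments)
-- ===== SOURCE B (Python) =====
-- def _collect_doc(lines, decl_line):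
--     # Forward single pass over lines[0:decl_line] with a small state machine,
--     # instead of A's backward while-loop with lookahead.
--     current = []
--     prev_blank = False
--     for i in range(decl_line):
--         s = lines[i].strip()
--         if s.startswith("//"):
--             current.append(s[2:].lstrip() if len(s) > 2 else "")
--             prev_blank = False
--         elif not s:
--             if prev_blank:
--                 current = []
--                 prev_blank = False
--             else:
--                 prev_blank = True
--         else:
--             current = []
--             prev_blank = False
--     return "\n".join(current)
-- ===== Notes on version B (the rewrite author's own statement) =====
-- stated objective: alternative
-- what changed: Replaces A's backward while-loop (scanning up from decl_line-1 with a lookahead at lines[j-1] and insert(0,...) prepends) by a single forward pass over range(decl_line) with a small state machine (accumulated block + previous-line-blank flag), appending in order.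
import Mathlib
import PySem

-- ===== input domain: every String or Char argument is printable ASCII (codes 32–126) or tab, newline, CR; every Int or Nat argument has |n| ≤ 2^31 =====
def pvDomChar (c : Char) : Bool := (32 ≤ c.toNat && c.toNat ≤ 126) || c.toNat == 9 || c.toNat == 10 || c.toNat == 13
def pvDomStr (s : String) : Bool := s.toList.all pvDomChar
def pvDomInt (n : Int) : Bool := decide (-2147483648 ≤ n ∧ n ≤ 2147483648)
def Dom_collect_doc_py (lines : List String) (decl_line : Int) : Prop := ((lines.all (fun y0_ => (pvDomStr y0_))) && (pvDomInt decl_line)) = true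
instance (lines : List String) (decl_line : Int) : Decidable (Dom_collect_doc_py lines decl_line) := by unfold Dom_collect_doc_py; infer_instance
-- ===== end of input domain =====

-- B replaces A's backward comment-gathering while-loop (with its one-blank-line lookahead and
-- insert(0,...) prepends) by a single forward state-machine pass over range(decl_line); same result.

-- ===== PORT A =====
-- A's comment text for a stripped comment line s: s[2:].lstrip() if len(s) > 2 else ""
def pvTextA (s : String) : String :=
  if 2 < PySem.Str.len s then PySem.Str.lstrip (PySem.Str.slice s (some 2) none) else ""

-- A's while-loop: state (j, comments); 'comments.insert(0, x)' is 'x :: comments'.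
def pvLoopA (lines : List String) (j : Int) (comments : List String) : List String :=
  if h : 0 ≤ j then
    let s := PySem.Str.strip (PySem.List.pyGetD lines j "")
    if PySem.Str.startswith s "//" then
      pvLoopA lines (j - 1) (pvTextA s :: comments)
    else if s = "" then
      if 0 ≤ j - 1 ∧ PySem.Str.startswith (PySem.Str.strip (PySem.List.pyGetD lines (j - 1) "")) "//" then
        pvLoopA lines (j - 1) comments
      else comments
    else comments
  else comments
termination_by (j + 1).toNat
decreasing_by all_goals omega

def collect_doc_py (lines : List String) (decl_line : Int) : String :=
  PySem.Str.join "\n" (pvLoopA lines (decl_line - 1) [])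

-- ===== PORT B =====
-- B's loop body: state (current block, prev_blank flag), one line index at a time.
def pvStepB (lines : List String) (st : List String × Bool) (i : Int) : List String × Bool :=
  let s := PySem.Str.strip (PySem.List.pyGetD lines i "")
  if PySem.Str.startswith s "//" then
    (st.1 ++ [if 2 < PySem.Str.len s then PySem.Str.lstrip (PySem.Str.slice s (some 2) none) else ""], false)
  else if s = "" then
    if st.2 then ([], false) else (st.1, true)
  else
    ([], false)

def collect_doc_py_alt (lines : List String) (decl_line : Int) : String :=
  PySem.Str.join "\n" (((PySem.List.pyRange 0 decl_line 1).foldl (pvStepB lines) ([], false)).1)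

-- ===== PRECONDITION & SPEC =====
-- A indexes lines[decl_line-1], …: it raises IndexError exactly when decl_line > len(lines).
def Pre_collect_doc_py (lines : List String) (decl_line : Int) : Prop :=
  decl_line ≤ (lines.length : Int)
instance (lines : List String) (decl_line : Int) : Decidable (Pre_collect_doc_py lines decl_line) := by unfold Pre_collect_doc_py; infer_instance

def pvWitness_collect_doc_py : List String × Int := (["// doc", "", "// more"], 3)

def Spec_collect_doc_py (lines : List String) (decl_line : Int) (out : String) : Prop := out = collect_doc_py_alt lines decl_line
instance (lines : List String) (decl_line : Int) (out : String) : Decidable (Spec_collect_doc_py lines decl_line out) := by unfold Spec_collect_doc_py; infer_instance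

-- ===== CLAIM (what is proved, stated in full; the proofs are below) =====
def Claim_equal_collect_doc_py : Prop := ∀ (lines : List String) (decl_line : Int), Dom_collect_doc_py lines decl_line → Pre_collect_doc_py lines decl_line → Spec_collect_doc_py lines decl_line (collect_doc_py lines decl_line)

-- ===== LEMMAS AND PROOFS =====

-- the stripped line at Nat index k
def pvS (lines : List String) (k : Nat) : String :=
  PySem.Str.strip (PySem.List.pyGetD lines (k : Int) "")

lemma empty_not_comment : PySem.Str.startswith "" "//" = false := by decide

lemma pvLoopA_neg (lines : List String) (j : Int) (acc : List String) (h : j < 0) :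
    pvLoopA lines j acc = acc := by
  rw [pvLoopA]; simp [not_le.mpr h]

lemma pvLoopA_comment (lines : List String) (j : Int) (acc : List String) (h : 0 ≤ j)
    (hc : PySem.Str.startswith (PySem.Str.strip (PySem.List.pyGetD lines j "")) "//" = true) :
    pvLoopA lines j acc =
      pvLoopA lines (j - 1) (pvTextA (PySem.Str.strip (PySem.List.pyGetD lines j "")) :: acc) := by
  rw [pvLoopA, dif_pos h]
  simp only [hc, if_true]

lemma pvLoopA_blank_skip (lines : List String) (j : Int) (acc : List String) (h : 0 ≤ j)
    (hb : PySem.Str.strip (PySem.List.pyGetD lines j "") = "")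
    (hn : 0 ≤ j - 1)
    (hp : PySem.Str.startswith (PySem.Str.strip (PySem.List.pyGetD lines (j - 1) "")) "//" = true) :
    pvLoopA lines j acc = pvLoopA lines (j - 1) acc := by
  rw [pvLoopA, dif_pos h]
  simp only [hb, empty_not_comment, Bool.false_eq_true, if_false, if_true]
  exact if_pos ⟨hn, hp⟩

lemma pvLoopA_blank_stop (lines : List String) (j : Int) (acc : List String) (h : 0 ≤ j)
    (hb : PySem.Str.strip (PySem.List.pyGetD lines j "") = "")
    (hn : ¬ (0 ≤ j - 1 ∧ PySem.Str.startswith (PySem.Str.strip (PySem.List.pyGetD lines (j - 1) "")) "//" = true)) :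
    pvLoopA lines j acc = acc := by
  rw [pvLoopA, dif_pos h]
  simp only [hb, empty_not_comment, Bool.false_eq_true, if_false, if_true]
  exact if_neg hn

lemma pvLoopA_other (lines : List String) (j : Int) (acc : List String) (h : 0 ≤ j)
    (hc : PySem.Str.startswith (PySem.Str.strip (PySem.List.pyGetD lines j "")) "//" = false)
    (hb : PySem.Str.strip (PySem.List.pyGetD lines j "") ≠ "") :
    pvLoopA lines j acc = acc := by
  rw [pvLoopA, dif_pos h]
  simp only [hc, Bool.false_eq_true, if_false]
  rw [if_neg hb]

-- the accumulator is only ever appended to on the right of the final result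
lemma pvLoopA_acc (lines : List String) (j : Int) (acc : List String) :
    pvLoopA lines j acc = pvLoopA lines j [] ++ acc := by
  by_cases h : 0 ≤ j
  · by_cases hc : PySem.Str.startswith (PySem.Str.strip (PySem.List.pyGetD lines j "")) "//" = true
    · rw [pvLoopA_comment lines j acc h hc, pvLoopA_comment lines j [] h hc,
        pvLoopA_acc lines (j-1) (pvTextA _ :: acc), pvLoopA_acc lines (j-1) [pvTextA _]]
      simp
    · rw [Bool.not_eq_true] at hc
      by_cases hb : PySem.Str.strip (PySem.List.pyGetD lines j "") = ""
      · by_cases hn : 0 ≤ j - 1 ∧ PySem.Str.startswith (PySem.Str.strip (PySem.List.pyGetD lines (j - 1) "")) "//" = true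
        · rw [pvLoopA_blank_skip lines j acc h hb hn.1 hn.2,
            pvLoopA_blank_skip lines j [] h hb hn.1 hn.2]
          exact pvLoopA_acc lines (j-1) acc
        · rw [pvLoopA_blank_stop lines j acc h hb hn, pvLoopA_blank_stop lines j [] h hb hn]
          simp
      · rw [pvLoopA_other lines j acc h hc hb, pvLoopA_other lines j [] h hc hb]; simp
  · rw [pvLoopA_neg lines j acc (by omega), pvLoopA_neg lines j [] (by omega)]; simp
termination_by (j + 1).toNat
decreasing_by all_goals omega

lemma pvStepB_comment (lines : List String) (st : List String × Bool) (i : Int)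
    (hc : PySem.Str.startswith (PySem.Str.strip (PySem.List.pyGetD lines i "")) "//" = true) :
    pvStepB lines st i = (st.1 ++ [pvTextA (PySem.Str.strip (PySem.List.pyGetD lines i ""))], false) := by
  unfold pvStepB
  simp only [hc, if_true]
  rfl

lemma pvStepB_blank (lines : List String) (st : List String × Bool) (i : Int)
    (hb : PySem.Str.strip (PySem.List.pyGetD lines i "") = "") :
    pvStepB lines st i = if st.2 then ([], false) else (st.1, true) := by
  unfold pvStepB
  simp only [hb, empty_not_comment, Bool.false_eq_true, if_false, if_true]

lemma pvStepB_other (lines : List String) (st : List String × Bool) (i : Int)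
    (hc : PySem.Str.startswith (PySem.Str.strip (PySem.List.pyGetD lines i "")) "//" = false)
    (hb : PySem.Str.strip (PySem.List.pyGetD lines i "") ≠ "") :
    pvStepB lines st i = ([], false) := by
  unfold pvStepB
  simp only [hc, Bool.false_eq_true, if_false]
  rw [if_neg hb]

-- the forward state machine after n steps vs A's backward collection from index n-1
lemma pvForward_inv (lines : List String) (n : Nat) :
    (PySem.List.pyRange 0 (n : Int) 1).foldl (pvStepB lines) ([], false) =
      (pvLoopA lines ((n : Int) - 1) [],
        ((PySem.List.pyRange 0 (n : Int) 1).foldl (pvStepB lines) ([], false)).2) ∧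
    (((PySem.List.pyRange 0 (n : Int) 1).foldl (pvStepB lines) ([], false)).2 = true →
        1 ≤ n ∧ pvS lines (n - 1) = "") ∧
    (1 ≤ n → pvS lines (n - 1) = "" →
        ((PySem.List.pyRange 0 (n : Int) 1).foldl (pvStepB lines) ([], false)).2 = false →
        pvLoopA lines ((n : Int) - 1) [] = []) := by
  induction n with
  | zero =>
    rw [PySem.List.pyRange_one_eq_nil (by omega)]
    refine ⟨?_, by simp, by omega⟩
    simp [pvLoopA_neg lines (-1) [] (by omega)]
  | succ n ih =>
    obtain ⟨ih1, ih2, ih3⟩ := ih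
    have hrange : PySem.List.pyRange 0 ((n + 1 : Nat) : Int) 1
        = PySem.List.pyRange 0 (n : Int) 1 ++ [(n : Int)] := by
      push_cast
      exact PySem.List.pyRange_one_succ_right (by omega)
    rw [hrange, List.foldl_append, List.foldl_cons, List.foldl_nil, ih1]
    set pb := ((PySem.List.pyRange 0 (n : Int) 1).foldl (pvStepB lines) ([], false)).2 with hpb
    have hcast : ((n + 1 : Nat) : Int) - 1 = ((n : Nat) : Int) := by push_cast; omega
    have hsucc : (n + 1) - 1 = n := by omega
    by_cases hc : PySem.Str.startswith (PySem.Str.strip (PySem.List.pyGetD lines ((n : Nat) : Int) "")) "//" = true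
    · -- comment line
      rw [pvStepB_comment lines _ ((n : Nat) : Int) hc]
      have hR : pvLoopA lines (((n + 1 : Nat) : Int) - 1) [] =
          pvLoopA lines (((n : Nat) : Int) - 1) []
            ++ [pvTextA (PySem.Str.strip (PySem.List.pyGetD lines ((n : Nat) : Int) ""))] := by
        rw [hcast, pvLoopA_comment lines ((n : Nat) : Int) [] (by omega) hc, pvLoopA_acc]
      refine ⟨by rw [hR], by simp, ?_⟩
      intro _ hblank _
      exfalso
      rw [hsucc] at hblank
      have hb' : PySem.Str.strip (PySem.List.pyGetD lines ((n : Nat) : Int) "") = "" := hblank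
      rw [hb', empty_not_comment] at hc
      exact Bool.false_ne_true hc
    · -- not a comment line
      rw [Bool.not_eq_true] at hc
      by_cases hb : PySem.Str.strip (PySem.List.pyGetD lines ((n : Nat) : Int) "") = ""
      · -- blank line
        rw [pvStepB_blank lines _ ((n : Nat) : Int) hb]
        by_cases hpbv : pb = true
        · -- second blank in a row: reset
          rw [if_pos hpbv]
          obtain ⟨hn1, hblankprev⟩ := ih2 hpbv
          have hRn : pvLoopA lines (((n + 1 : Nat) : Int) - 1) [] = [] := by
            rw [hcast]
            apply pvLoopA_blank_stop lines ((n : Nat) : Int) [] (by omega) hb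
            rintro ⟨_, hp⟩
            have he : ((n : Nat) : Int) - 1 = ((n - 1 : Nat) : Int) := by omega
            rw [he] at hp
            have hb2 : PySem.Str.strip (PySem.List.pyGetD lines ((n - 1 : Nat) : Int) "") = "" := hblankprev
            rw [hb2, empty_not_comment] at hp
            exact Bool.false_ne_true hp
          refine ⟨by rw [hRn], by simp, ?_⟩
          intro _ _ _; rw [hRn]
        · -- first blank: keep block, set flag
          rw [if_neg hpbv]
          rw [Bool.not_eq_true] at hpbv
          have hR : pvLoopA lines ((n : Nat) : Int) [] = pvLoopA lines (((n : Nat) : Int) - 1) [] := by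
            by_cases hn0 : 1 ≤ n
            · by_cases hcp : PySem.Str.startswith (PySem.Str.strip (PySem.List.pyGetD lines (((n : Nat) : Int) - 1) "")) "//" = true
              · exact pvLoopA_blank_skip lines ((n : Nat) : Int) [] (by omega) hb (by omega) hcp
              · -- previous line is neither blank-with-comment-above nor comment: both sides are []
                rw [Bool.not_eq_true] at hcp
                have hprev : (((n : Nat) : Int) - 1) = ((n - 1 : Nat) : Int) := by omega
                have hA : pvLoopA lines ((n : Nat) : Int) [] = [] := by
                  apply pvLoopA_blank_stop lines ((n : Nat) : Int) [] (by omega) hb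
                  rintro ⟨_, hp⟩
                  rw [hp] at hcp
                  exact Bool.noConfusion hcp
                have hB : pvLoopA lines (((n : Nat) : Int) - 1) [] = [] := by
                  by_cases hbp : PySem.Str.strip (PySem.List.pyGetD lines ((n - 1 : Nat) : Int) "") = ""
                  · exact hprev ▸ ih3 hn0 hbp hpbv
                  · rw [hprev]
                    exact pvLoopA_other lines _ [] (by omega) (hprev ▸ hcp) hbp
                rw [hA, hB]
            · -- n = 0: both sides empty
              have hn0' : n = 0 := by omega
              subst hn0'
              have hA : pvLoopA lines ((0 : Nat) : Int) [] = [] := by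
                apply pvLoopA_blank_stop lines _ [] (by omega) hb
                rintro ⟨h0, _⟩
                omega
              rw [hA, pvLoopA_neg lines _ [] (by omega)]
          refine ⟨by rw [hcast, hR], ?_, ?_⟩
          · intro _
            refine ⟨by omega, ?_⟩
            rw [hsucc]
            exact hb
          · intro _ _ hfalse
            exact absurd hfalse (by simp)
      · -- non-blank, non-comment: reset
        rw [pvStepB_other lines _ ((n : Nat) : Int) hc hb]
        have hRn : pvLoopA lines (((n + 1 : Nat) : Int) - 1) [] = [] := by
          rw [hcast]
          exact pvLoopA_other lines ((n : Nat) : Int) [] (by omega) hc hb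
        refine ⟨by rw [hRn], by simp, ?_⟩
        intro _ hblank _
        exfalso
        rw [hsucc] at hblank
        exact hb hblank

-- ===== VERDICT (by name: the statement is the Claim_ definition above) =====
theorem collect_doc_py_spec : Claim_equal_collect_doc_py := by
  intro lines decl_line _ _
  unfold Spec_collect_doc_py collect_doc_py collect_doc_py_alt
  congr 1
  by_cases hd : decl_line ≤ 0
  · rw [PySem.List.pyRange_one_eq_nil hd, List.foldl_nil,
      pvLoopA_neg lines (decl_line - 1) [] (by omega)]
  · obtain ⟨n, rfl⟩ : ∃ m : Nat, decl_line = (m : Int) := ⟨decl_line.toNat, by omega⟩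
    rw [(pvForward_inv lines n).1]
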